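-- pv_equiv track=rewrite | github.com/hanqpark/algorithm_training | programmers/level_2/멀리 뛰기.py | bfs
-- ===== SOURCE A (Python) =====
-- from collections import deque
--
-- def bfs(n):
--     dq = deque([0])
--     cnt = 0
--     while dq:
--         now = dq.popleft()
--         if now == n:
--             cnt += 1
--         elif now < n:
--             dq.append(now+1)
--             dq.append(now+2)
--     return cnt
-- ===== SOURCE B (Python) =====
-- def bfs(n):
--     if n < 0:
--         return 0
--     a, b = 1, 0
--     for _ in range(n):
--         a, b = a + b, a
--     return a
-- ===== Notes on version B (the rewrite author's own statement) =====
-- stated objective: faster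
-- what changed: Replaced the breadth-first enumeration of every individual +1/+2 path (exponentially many deque pops) with an iterative two-variable Fibonacci recurrence counting paths per position.
import Mathlib
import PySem

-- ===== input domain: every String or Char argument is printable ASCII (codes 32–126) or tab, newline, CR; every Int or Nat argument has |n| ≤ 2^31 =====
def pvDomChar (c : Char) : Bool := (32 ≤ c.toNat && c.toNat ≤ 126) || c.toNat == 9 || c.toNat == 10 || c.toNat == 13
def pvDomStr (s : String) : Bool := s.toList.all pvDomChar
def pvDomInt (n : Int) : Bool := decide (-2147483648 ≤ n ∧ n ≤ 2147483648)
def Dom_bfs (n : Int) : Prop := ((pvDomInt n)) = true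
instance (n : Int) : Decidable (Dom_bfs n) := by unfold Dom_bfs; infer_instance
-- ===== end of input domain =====

-- B replaces A's exponential breadth-first path enumeration by an O(n) two-variable
-- Fibonacci-style recurrence; same return value for every n.

-- ===== PORT A =====
-- needed by the port's decreasing_by: splitting a node of distance d ≥ 1 into its
-- two children strictly shrinks the 3-power potential
theorem pvPow3_split (d : Int) (hd : 1 ≤ d) :
    3 ^ ((d-1).toNat) + 3 ^ ((d-2).toNat) < 3 ^ (d.toNat) := by
  rcases eq_or_lt_of_le hd with h | h
  · have : d.toNat = 1 := by omega
    have h1 : (d-1).toNat = 0 := by omega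
    have h2 : (d-2).toNat = 0 := by omega
    simp [this, h1, h2]
  · have h2 : 2 ≤ d := by omega
    have hk : d.toNat = (d-2).toNat + 2 := by omega
    have hk1 : (d-1).toNat = (d-2).toNat + 1 := by omega
    rw [hk, hk1, pow_succ, pow_succ, pow_succ]
    have hp : 1 ≤ 3 ^ ((d-2).toNat) := Nat.one_le_pow _ _ (by norm_num)
    nlinarith [hp]

-- the while-loop over the deque, transliterated; the deque is the standard two-list
-- functional queue (pop from `front`, push onto `back`), giving the same pop order
def bfsLoop (n : Int) (front back : List Int) (cnt : Int) : Int :=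
  match front, back with
  | now :: rest, back =>
    if now = n then bfsLoop n rest back (cnt + 1)
    else if now < n then bfsLoop n rest ((now + 2) :: (now + 1) :: back) cnt
    else bfsLoop n rest back cnt
  | [], [] => cnt
  | [], b :: bs => bfsLoop n (b :: bs).reverse [] cnt
termination_by (((front ++ back).map (fun x => 3 ^ ((n - x).toNat))).sum, back.length)
decreasing_by
  · apply Prod.Lex.left
    simp only [List.cons_append, List.map_cons, List.sum_cons]
    have : 1 ≤ 3 ^ ((n - now).toNat) := Nat.one_le_pow _ _ (by norm_num)
    omega
  · apply Prod.Lex.left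
    simp only [List.cons_append, List.map_cons, List.map_append, List.sum_cons, List.sum_append]
    have hd : 1 ≤ n - now := by omega
    have := pvPow3_split (n - now) hd
    have e1 : n - (now + 1) = (n - now) - 1 := by ring
    have e2 : n - (now + 2) = (n - now) - 2 := by ring
    rw [e1, e2]
    omega
  · apply Prod.Lex.left
    simp only [List.cons_append, List.map_cons, List.sum_cons]
    have : 1 ≤ 3 ^ ((n - now).toNat) := Nat.one_le_pow _ _ (by norm_num)
    omega
  · have : ((List.reverse (b :: bs) ++ []).map (fun x => 3 ^ ((n - x).toNat))).sum
        = (([] ++ (b :: bs)).map (fun x => 3 ^ ((n - x).toNat))).sum := by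
      simp [List.sum_reverse]; omega
    rw [this]
    apply Prod.Lex.right
    simp

def bfs (n : Int) : Int := bfsLoop n [0] [] 0

-- ===== PORT B =====
def bfs_alt (n : Int) : Int :=
  if n < 0 then 0
  else
    ((List.range n.toNat).foldl (fun (p : Int × Int) _ => (p.1 + p.2, p.1)) (1, 0)).1

-- ===== PRECONDITION & SPEC =====
def Spec_bfs (n : Int) (out : Int) : Prop := out = bfs_alt n
instance (n : Int) (out : Int) : Decidable (Spec_bfs n out) := by unfold Spec_bfs; infer_instance

-- ===== CLAIM (what is proved, stated in full; the proofs are below) =====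
def Claim_equal_bfs : Prop := ∀ (n : Int), Dom_bfs n → Spec_bfs n (bfs n)

-- ===== LEMMAS AND PROOFS =====

-- number of +1/+2 paths covering distance k
def pvFib : Nat → Int
  | 0 => 1
  | 1 => 1
  | (k+2) => pvFib (k+1) + pvFib k

-- paths from position x to target n
def pvPaths (n x : Int) : Int := if n - x < 0 then 0 else pvFib ((n - x).toNat)

theorem pvPaths_eq_self (n : Int) : pvPaths n n = 1 := by
  simp [pvPaths, pvFib]

theorem pvPaths_gt (n x : Int) (h : n < x) : pvPaths n x = 0 := by
  simp [pvPaths]; omega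

theorem pvPaths_rec (n x : Int) (h : x < n) :
    pvPaths n x = pvPaths n (x + 1) + pvPaths n (x + 2) := by
  rcases eq_or_lt_of_le (by omega : x + 1 ≤ n) with h1 | h1
  · have e2 : n - (x+2) < 0 := by omega
    simp only [pvPaths]
    rw [if_neg (by omega), if_neg (by omega), if_pos e2]
    have t0 : (n - x).toNat = 1 := by omega
    have t1 : (n - (x+1)).toNat = 0 := by omega
    simp [t0, t1, pvFib]
  · have e2 : ¬ n - (x+2) < 0 := by omega
    have hk : (n - x).toNat = (n - (x+2)).toNat + 2 := by omega
    have hk1 : (n - (x+1)).toNat = (n - (x+2)).toNat + 1 := by omega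
    simp only [pvPaths, if_neg (by omega : ¬ n - x < 0), if_neg (by omega : ¬ n - (x+1) < 0),
      if_neg e2, hk, hk1, pvFib]

-- loop invariant: bfsLoop returns cnt plus the number of paths from each queued node
theorem bfsLoop_eq (n : Int) (front back : List Int) (cnt : Int) :
    bfsLoop n front back cnt = cnt + ((front ++ back.reverse).map (pvPaths n)).sum := by
  fun_induction bfsLoop n front back cnt with
  | case1 cnt rest back ih =>
      rw [ih]
      simp only [List.cons_append, List.map_cons, List.sum_cons, pvPaths_eq_self]
      ring
  | case2 cnt now rest back hne hlt ih =>
      rw [ih]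
      simp only [List.reverse_cons, List.append_assoc, List.cons_append, List.map_append,
        List.map_cons, List.sum_append, List.sum_cons, List.map_nil, List.sum_nil,
        pvPaths_rec n now hlt]
      ring
  | case3 cnt now rest back hne hge ih =>
      rw [ih]
      simp only [List.cons_append, List.map_cons, List.sum_cons, pvPaths_gt n now (by omega)]
      ring
  | case4 cnt => simp
  | case5 cnt b bs ih =>
      rw [ih]
      simp

-- B's fold state after k steps is (pvFib k, previous value)
theorem pvFold_range (k : Nat) :
    ((List.range k).foldl (fun (p : Int × Int) _ => (p.1 + p.2, p.1)) (1, 0)).1 = pvFib k := by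
  suffices h : ∀ m : Nat, (List.range (m+1)).foldl (fun (p : Int × Int) _ => (p.1 + p.2, p.1)) (1, 0)
      = (pvFib (m+1), pvFib m) by
    cases k with
    | zero => simp [pvFib]
    | succ m => rw [h m]
  intro m
  induction m with
  | zero => simp [List.range_succ, pvFib]
  | succ m ih =>
      rw [List.range_succ, List.foldl_append, ih]
      simp [pvFib]

-- ===== VERDICT (by name: the statement is the Claim_ definition above) =====
theorem bfs_spec : Claim_equal_bfs := by
  intro n _
  show bfs n = bfs_alt n
  rw [bfs, bfsLoop_eq]
  simp only [List.reverse_nil, List.append_nil, List.map_cons, List.map_nil, List.sum_cons,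
    List.sum_nil]
  by_cases h : n < 0
  · simp [bfs_alt, if_pos h, pvPaths_gt n 0 h]
  · simp only [bfs_alt, pvFold_range, pvPaths, sub_zero, if_neg (by omega : ¬ n < 0)]
    ring
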